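-- pv_equiv track=rewrite | github.com/biopython/biopython | Bio/PopGen/SimCoal/Template.py | generate_island_mat
-- ===== SOURCE A (Python) =====
-- def generate_island_mat(total_size, mig):
--     mig_mat = ''
--     for x in range(1, total_size + 1):
--         for y in range(1, total_size + 1):
--             if (x == y):
--                 mig_mat += '0 '
--             else:
--                 mig_mat += '!!!' + str(mig) + '!!! '
--         mig_mat += "\r\n"
--     return mig_mat
-- ===== SOURCE B (Python) =====
-- def generate_island_mat(total_size, mig):
--     cell = '!!!' + str(mig) + '!!! '
--     rows = []
--     for x in range(total_size):
--         row = [cell] * total_size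
--         row[x] = '0 '
--         rows.append(''.join(row) + '\r\n')
--     return ''.join(rows)
-- ===== Notes on version B (the rewrite author's own statement) =====
-- stated objective: alternative
-- what changed: Replaces the per-cell x==y branch and quadratic string concatenation with computing the off-diagonal token once, building each row as a uniform list patched at the diagonal index, and joining rows; str(mig) is formatted once instead of once per cell.
import Mathlib
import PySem

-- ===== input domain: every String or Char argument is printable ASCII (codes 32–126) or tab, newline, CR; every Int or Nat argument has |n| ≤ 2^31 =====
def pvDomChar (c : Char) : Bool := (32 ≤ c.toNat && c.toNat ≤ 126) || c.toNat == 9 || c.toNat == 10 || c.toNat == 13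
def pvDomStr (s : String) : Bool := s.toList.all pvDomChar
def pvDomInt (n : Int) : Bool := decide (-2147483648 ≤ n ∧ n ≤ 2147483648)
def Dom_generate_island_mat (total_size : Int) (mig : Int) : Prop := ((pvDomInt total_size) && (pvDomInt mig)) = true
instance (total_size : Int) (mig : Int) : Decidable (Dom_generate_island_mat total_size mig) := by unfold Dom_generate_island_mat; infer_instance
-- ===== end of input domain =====

-- B builds each row as a uniform list patched at the diagonal index and joins, instead of A's per-cell branch; same return value.

-- ===== PORT A =====
def generate_island_mat (total_size : Int) (mig : Int) : String :=
  (PySem.List.pyRange 1 (total_size + 1) 1).foldl (fun mig_mat x =>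
    ((PySem.List.pyRange 1 (total_size + 1) 1).foldl (fun mig_mat y =>
      if x == y then mig_mat ++ "0 "
      else mig_mat ++ ("!!!" ++ PySem.Int.toStr mig ++ "!!! ")) mig_mat)
    ++ "\r\n") ""

-- ===== PORT B =====
def generate_island_mat_alt (total_size : Int) (mig : Int) : String :=
  String.join ((PySem.List.pyRange 0 total_size 1).map (fun x =>
    String.join ((List.replicate total_size.toNat
        ("!!!" ++ PySem.Int.toStr mig ++ "!!! ")).set x.toNat "0 ") ++ "\r\n"))

-- ===== PRECONDITION & SPEC =====
def Spec_generate_island_mat (total_size : Int) (mig : Int) (out : String) : Prop := out = generate_island_mat_alt total_size mig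
instance (total_size : Int) (mig : Int) (out : String) : Decidable (Spec_generate_island_mat total_size mig out) := by unfold Spec_generate_island_mat; infer_instance

-- ===== CLAIM (what is proved, stated in full; the proofs are below) =====
def Claim_equal_generate_island_mat : Prop := ∀ (total_size : Int) (mig : Int), Dom_generate_island_mat total_size mig → Spec_generate_island_mat total_size mig (generate_island_mat total_size mig)

-- ===== LEMMAS AND PROOFS =====

theorem foldl_str_shift (l : List String) (a : String) :
    l.foldl (· ++ ·) a = a ++ l.foldl (· ++ ·) "" := by
  induction l generalizing a with
  | nil => simp
  | cons h t ih =>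
    simp only [List.foldl_cons]
    rw [ih (a ++ h), ih ("" ++ h), String.empty_append, String.append_assoc]

-- accumulating string fold = prefix ++ join of the pieces
theorem str_foldl_append {α : Type} (g : α → String) (l : List α) (acc : String) :
    l.foldl (fun a x => a ++ g x) acc = acc ++ String.join (l.map g) := by
  induction l generalizing acc with
  | nil => simp [String.join]
  | cons h t ih =>
    simp only [List.foldl_cons, List.map_cons, String.join, ih, String.append_assoc]
    rw [String.empty_append, foldl_str_shift (t.map g) (g h)]

theorem foldl_ite_append (p : Int → Bool) (s1 s2 : String) (l : List Int) (acc : String) :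
    l.foldl (fun a y => if p y then a ++ s1 else a ++ s2) acc
      = acc ++ String.join (l.map (fun y => if p y then s1 else s2)) := by
  have h : (fun (a : String) y => if p y then a ++ s1 else a ++ s2)
      = fun a y => a ++ (if p y then s1 else s2) := by
    funext a y; split <;> rfl
  rw [h, str_foldl_append]

theorem foldl_row_append (f : Int → String) (l : List Int) (acc : String) :
    l.foldl (fun a x => (a ++ f x) ++ "\r\n") acc
      = acc ++ String.join (l.map (fun x => f x ++ "\r\n")) := by
  have h : (fun (a : String) x => (a ++ f x) ++ "\r\n")
      = fun a x => a ++ (f x ++ "\r\n") := by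
    funext a x; rw [String.append_assoc]
  rw [h, str_foldl_append]

-- a row: selecting by index equality = replicate patched at that index
theorem row_eq (cell z : String) (n i : Nat) :
    (List.range n).map (fun j => if i = j then z else cell)
      = (List.replicate n cell).set i z := by
  refine List.ext_getElem (by simp) fun k h1 h2 => ?_
  by_cases h : i = k
  · simp [h]
  · simp [List.getElem_set, h]

theorem gim_eq (total_size mig : Int) :
    generate_island_mat total_size mig = generate_island_mat_alt total_size mig := by
  unfold generate_island_mat generate_island_mat_alt
  have hr1 : PySem.List.pyRange 1 (total_size + 1) 1
      = (List.range total_size.toNat).map (fun k : Nat => 1 + (k : Int)) := by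
    rw [PySem.List.pyRange_one]; simp
  have hr0 : PySem.List.pyRange 0 total_size 1
      = (List.range total_size.toNat).map (fun k : Nat => (k : Int)) := by
    rw [PySem.List.pyRange_one]; simp
  rw [hr1, hr0]
  simp only [foldl_ite_append (fun y => _ == y)]
  rw [foldl_row_append]
  simp only [List.map_map, Function.comp_def, String.empty_append]
  congr 1
  apply List.map_congr_left
  intro k hk
  congr 1
  have h2 : (List.range total_size.toNat).map
        (fun j : Nat => if ((1 + (k : Int)) == (1 + (j : Int))) then "0 "
                  else "!!!" ++ PySem.Int.toStr mig ++ "!!! ")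
      = (List.range total_size.toNat).map
        (fun j : Nat => if k = j then "0 "
                  else "!!!" ++ PySem.Int.toStr mig ++ "!!! ") := by
    apply List.map_congr_left
    intro j hj
    by_cases h : k = j <;> simp [h]
  rw [h2, row_eq]
  simp

-- ===== VERDICT (by name: the statement is the Claim_ definition above) =====
theorem generate_island_mat_spec : Claim_equal_generate_island_mat := by
  intro ts mig _
  exact gim_eq ts mig
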